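-- pv_equiv track=rewrite | github.com/xianggebenben/cbADMM | common.py | merge_subnet
-- ===== SOURCE A (Python) =====
-- def merge_subnet(w, z, num_layers, i):
--     w_new = []
--     z_new = []
--     num_layers_new=[]
--     assert len(w) > 1 and len(z) > 1 and len(num_layers) > 1,"should be at least two subnetworks"
--     assert len(w)== len(z) and len(num_layers)==len(z)," the number of subnetworks should be consistent"
--     assert i<len(num_layers), "should be within the number of subnetworks"
--     for k in range(len(num_layers)):
--         if k!=i-1 and k!=i:
--             w_new.append(w[k])
--             z_new.append(z[k])
--             num_layers_new.append(num_layers[k])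
--         else:
--             if k==i:
--                 w_new.append(w[k-1]+w[k])
--                 z_new.append(z[k])
--                 num_layers_new.append(num_layers[k-1]+num_layers[k])
--     return w_new,z_new,num_layers_new
-- ===== SOURCE B (Python) =====
-- def merge_subnet(w, z, num_layers, i):
--     assert len(w) > 1 and len(z) > 1 and len(num_layers) > 1, "should be at least two subnetworks"
--     assert len(w) == len(z) and len(num_layers) == len(z), " the number of subnetworks should be consistent"
--     assert i < len(num_layers), "should be within the number of subnetworks"
--     w_new = list(w)
--     z_new = list(z)
--     nl_new = list(num_layers)
--     w_new[i] = w[i - 1] + w[i]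
--     nl_new[i] = num_layers[i - 1] + num_layers[i]
--     if i > 0:
--         del w_new[i - 1]
--         del z_new[i - 1]
--         del nl_new[i - 1]
--     return w_new, z_new, nl_new
-- ===== Notes on version B (the rewrite author's own statement) =====
-- stated objective: simpler
-- what changed: Replaces the element-by-element range loop with copy-assign-delete: copy the three lists, overwrite entry i with the merged values, and delete the now-redundant entry i-1 when i>0; Pre_ excludes negative i, an out-of-range index A's asserts fail to reject, where A's copy-everything-unchanged and B's negative-indexed behaviour are both accidents of list indexing.
-- outside the precondition, e.g. on merge_subnet([[], []], [[], []], [1, 2], -3): A returns ([[], []], [[], []], [1, 2]), B raises IndexError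
import Mathlib
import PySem

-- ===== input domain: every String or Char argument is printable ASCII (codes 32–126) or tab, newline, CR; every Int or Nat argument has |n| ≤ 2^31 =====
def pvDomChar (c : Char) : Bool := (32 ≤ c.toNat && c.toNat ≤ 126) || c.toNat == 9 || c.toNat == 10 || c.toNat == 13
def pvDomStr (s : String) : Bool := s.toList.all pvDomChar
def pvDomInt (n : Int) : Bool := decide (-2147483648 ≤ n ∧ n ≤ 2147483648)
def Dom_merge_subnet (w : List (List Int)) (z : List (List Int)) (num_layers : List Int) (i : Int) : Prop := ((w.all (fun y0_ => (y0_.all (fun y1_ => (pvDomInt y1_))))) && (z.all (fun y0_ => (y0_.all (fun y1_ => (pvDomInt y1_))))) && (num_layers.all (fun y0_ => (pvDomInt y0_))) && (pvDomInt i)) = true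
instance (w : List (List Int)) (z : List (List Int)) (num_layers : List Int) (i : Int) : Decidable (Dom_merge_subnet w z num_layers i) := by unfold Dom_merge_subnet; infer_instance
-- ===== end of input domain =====

-- B replaces A's element-by-element range loop with copy-assign-delete; return values agree on
-- all inputs passing A's asserts with a nonnegative index i (Pre_), as proved below.

-- ===== PORT A =====
def merge_subnet (w : List (List Int)) (z : List (List Int)) (num_layers : List Int) (i : Int) : List (List Int) × List (List Int) × List Int :=
  (PySem.List.pyRange 0 (num_layers.length : Int) 1).foldl
    (fun (s : List (List Int) × List (List Int) × List Int) k =>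
      if k ≠ i - 1 ∧ k ≠ i then
        (s.1 ++ [PySem.List.pyGetD w k []],
         s.2.1 ++ [PySem.List.pyGetD z k []],
         s.2.2 ++ [PySem.List.pyGetD num_layers k 0])
      else if k = i then
        (s.1 ++ [PySem.List.pyGetD w (k - 1) [] ++ PySem.List.pyGetD w k []],
         s.2.1 ++ [PySem.List.pyGetD z k []],
         s.2.2 ++ [PySem.List.pyGetD num_layers (k - 1) 0 + PySem.List.pyGetD num_layers k 0])
      else s)
    ([], [], [])

-- ===== PORT B =====
-- w_new[i] = w[i-1] + w[i]; nl_new[i] = …; del …[i-1] when i > 0  (indices in range under Pre_)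
def merge_subnet_alt (w : List (List Int)) (z : List (List Int)) (num_layers : List Int) (i : Int) : List (List Int) × List (List Int) × List Int :=
  let w_new := PySem.List.pySetD w i (PySem.List.pyGetD w (i - 1) [] ++ PySem.List.pyGetD w i [])
  let nl_new := PySem.List.pySetD num_layers i (PySem.List.pyGetD num_layers (i - 1) 0 + PySem.List.pyGetD num_layers i 0)
  if 0 < i then
    (w_new.eraseIdx (i - 1).toNat, z.eraseIdx (i - 1).toNat, nl_new.eraseIdx (i - 1).toNat)
  else
    (w_new, z, nl_new)

-- ===== PRECONDITION & SPEC =====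
-- Pre_ is A's three asserts plus 0 ≤ i: a negative i is an out-of-range subnetwork index that
-- A's asserts fail to reject; there A happens to copy everything unchanged while B's
-- negative-indexed assignment merges at a wrapped position — both values are accidents of
-- Python list indexing and neither would be specified, so those inputs are excluded.
def Pre_merge_subnet (w : List (List Int)) (z : List (List Int)) (num_layers : List Int) (i : Int) : Prop :=
  1 < w.length ∧ 1 < z.length ∧ 1 < num_layers.length ∧ w.length = z.length ∧ num_layers.length = z.length ∧ 0 ≤ i ∧ i < (num_layers.length : Int)
instance (w : List (List Int)) (z : List (List Int)) (num_layers : List Int) (i : Int) : Decidable (Pre_merge_subnet w z num_layers i) := by unfold Pre_merge_subnet; infer_instance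
def pvWitness_merge_subnet : List (List Int) × List (List Int) × List Int × Int := ([[1], [2]], [[3], [4]], [5, 6], 1)

def Spec_merge_subnet (w : List (List Int)) (z : List (List Int)) (num_layers : List Int) (i : Int) (out : List (List Int) × List (List Int) × List Int) : Prop := out = merge_subnet_alt w z num_layers i
instance (w : List (List Int)) (z : List (List Int)) (num_layers : List Int) (i : Int) (out : List (List Int) × List (List Int) × List Int) : Decidable (Spec_merge_subnet w z num_layers i out) := by unfold Spec_merge_subnet; infer_instance

-- ===== CLAIM (what is proved, stated in full; the proofs are below) =====
def Claim_equal_merge_subnet : Prop := ∀ (w : List (List Int)) (z : List (List Int)) (num_layers : List Int) (i : Int), Dom_merge_subnet w z num_layers i → Pre_merge_subnet w z num_layers i → Spec_merge_subnet w z num_layers i (merge_subnet w z num_layers i)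

-- ===== LEMMAS AND PROOFS =====

-- per-index contributions of A's loop to the three output lists
def gW (w : List (List Int)) (i : Int) (k : Int) : List (List Int) :=
  if k ≠ i - 1 ∧ k ≠ i then [PySem.List.pyGetD w k []]
  else if k = i then [PySem.List.pyGetD w (k - 1) [] ++ PySem.List.pyGetD w k []] else []
def gZ (z : List (List Int)) (i : Int) (k : Int) : List (List Int) :=
  if k ≠ i - 1 ∧ k ≠ i then [PySem.List.pyGetD z k []]
  else if k = i then [PySem.List.pyGetD z k []] else []
def gN (num_layers : List Int) (i : Int) (k : Int) : List Int :=
  if k ≠ i - 1 ∧ k ≠ i then [PySem.List.pyGetD num_layers k 0]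
  else if k = i then [PySem.List.pyGetD num_layers (k - 1) 0 + PySem.List.pyGetD num_layers k 0] else []

-- A's fold decomposes into three independent flatMaps over the index range
theorem foldl_A_eq (w z : List (List Int)) (num_layers : List Int) (i : Int)
    (l : List Int) (a b : List (List Int)) (c : List Int) :
    l.foldl
      (fun (s : List (List Int) × List (List Int) × List Int) k =>
        if k ≠ i - 1 ∧ k ≠ i then
          (s.1 ++ [PySem.List.pyGetD w k []],
           s.2.1 ++ [PySem.List.pyGetD z k []],
           s.2.2 ++ [PySem.List.pyGetD num_layers k 0])
        else if k = i then
          (s.1 ++ [PySem.List.pyGetD w (k - 1) [] ++ PySem.List.pyGetD w k []],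
           s.2.1 ++ [PySem.List.pyGetD z k []],
           s.2.2 ++ [PySem.List.pyGetD num_layers (k - 1) 0 + PySem.List.pyGetD num_layers k 0])
        else s)
      (a, b, c)
    = (a ++ l.flatMap (gW w i), b ++ l.flatMap (gZ z i), c ++ l.flatMap (gN num_layers i)) := by
  induction l generalizing a b c with
  | nil => simp
  | cons x xs ih =>
    simp only [List.foldl_cons, List.flatMap_cons]
    by_cases h1 : x ≠ i - 1 ∧ x ≠ i
    · rw [if_pos h1, ih]
      simp [gW, gZ, gN, if_pos h1]
    · by_cases h2 : x = i
      · rw [if_neg h1, if_pos h2, ih]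
        simp [gW, gZ, gN, if_neg h1, if_pos h2]
      · rw [if_neg h1, if_neg h2, ih]
        simp [gW, gZ, gN, if_neg h1, if_neg h2]

-- map of pyGetD over an index segment is a take/drop slice
theorem map_getD_seg {α : Type} (xs : List α) (d : α) (a b : Int) (ha : 0 ≤ a) (hb : b ≤ (xs.length : Int)) :
    (PySem.List.pyRange a b 1).map (fun j => PySem.List.pyGetD xs j d) = (xs.take b.toNat).drop a.toNat := by
  by_cases hb0 : b ≤ a
  · rw [PySem.List.pyRange_one_eq_nil hb0]
    simp only [List.map_nil]
    by_cases h : b ≤ 0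
    · simp [Int.toNat_of_nonpos h]
    · rw [Int.not_le] at h
      symm; rw [List.drop_eq_nil_iff]
      simp only [List.length_take]
      omega
  · rw [Int.not_le] at hb0
    have h0b : 0 ≤ b := le_of_lt (lt_of_le_of_lt ha hb0)
    have hlen : ((xs.take b.toNat).length : Int) = b := by
      simp only [List.length_take]; omega
    have h1 := PySem.List.map_pyGetD_pyRange' (xs := xs.take b.toNat) (d := d) (a := a) ha
    rw [hlen] at h1
    rw [← h1]
    apply List.map_congr_left
    intro j hj
    rw [PySem.List.mem_pyRange_one] at hj
    obtain ⟨m, rfl⟩ := Int.eq_ofNat_of_zero_le (le_trans ha hj.1)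
    simp only [PySem.List.pyGetD_natCast, List.getD, List.getElem?_take]
    rw [if_pos (by omega : m < b.toNat)]

theorem flatMap_singleton_eq_map {α β : Type} (l : List α) (f : α → β) :
    l.flatMap (fun x => [f x]) = l.map f := by
  induction l with
  | nil => rfl
  | cons x xs ih => simp [List.flatMap_cons, ih]

theorem flatMap_congr_mem {α β : Type} {l : List α} {f g : α → List β} (h : ∀ x ∈ l, f x = g x) :
    l.flatMap f = l.flatMap g := by
  induction l with
  | nil => rfl
  | cons x xs ih =>
    simp only [List.flatMap_cons]
    rw [h x (List.mem_cons_self), ih (fun y hy => h y (List.mem_cons_of_mem x hy))]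

-- a whole segment of plain copies
theorem seg_copy {α : Type} (xs : List α) (d : α) (a b : Int) (ha : 0 ≤ a) (hb : b ≤ (xs.length : Int))
    (g : Int → List α) (hg : ∀ k, a ≤ k → k < b → g k = [PySem.List.pyGetD xs k d]) :
    (PySem.List.pyRange a b 1).flatMap g = (xs.take b.toNat).drop a.toNat := by
  rw [flatMap_congr_mem (g := fun k => [PySem.List.pyGetD xs k d])
        (fun x hx => by rw [PySem.List.mem_pyRange_one] at hx; exact hg x hx.1 hx.2),
      flatMap_singleton_eq_map, map_getD_seg xs d a b ha hb]

-- set an entry then delete the one before it = take / merged entry / drop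
theorem set_eraseIdx {α : Type} (xs : List α) (j : Nat) (v : α) (h1 : 1 ≤ j) (h2 : j < xs.length) :
    (xs.set j v).eraseIdx (j - 1) = xs.take (j - 1) ++ v :: xs.drop (j + 1) := by
  rw [List.eraseIdx_eq_take_drop_succ, List.take_set, List.drop_set,
      if_neg (by omega : ¬ j < j - 1 + 1)]
  congr 1
  · exact List.set_eq_of_length_le (by simp only [List.length_take]; omega)
  · have e : j - (j - 1 + 1) = 0 := by omega
    have e2 : j - 1 + 1 = j := by omega
    rw [e, e2, List.drop_eq_getElem_cons h2]
    rfl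

-- ===== VERDICT (by name: the statement is the Claim_ definition above) =====
theorem merge_subnet_spec : Claim_equal_merge_subnet := by
  intro w z nl i _ hpre
  obtain ⟨hw, hz, hn, hwz, hnz, hi0, hi⟩ := hpre
  have hwn : w.length = nl.length := by omega
  have hzn : z.length = nl.length := by omega
  unfold Spec_merge_subnet merge_subnet merge_subnet_alt
  rw [foldl_A_eq]
  simp only [List.nil_append]
  rcases eq_or_lt_of_le hi0 with h0 | hpos
  · -- i = 0 : wraparound merge at index 0, length unchanged, no deletion
    rw [← h0]
    rw [if_neg (by omega)]
    rw [PySem.List.pyRange_one_cons (by omega)]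
    have e0 : (0 : Int) + 1 = 1 := by norm_num
    rw [e0]
    simp only [List.flatMap_cons]
    rw [seg_copy w [] 1 (nl.length : Int) (by omega) (by omega)
          _ (fun k hk1 hk2 => by rw [gW, if_pos ⟨by omega, by omega⟩]),
        seg_copy z [] 1 (nl.length : Int) (by omega) (by omega)
          _ (fun k hk1 hk2 => by rw [gZ, if_pos ⟨by omega, by omega⟩]),
        seg_copy nl 0 1 (nl.length : Int) (by omega) (by omega)
          _ (fun k hk1 hk2 => by rw [gN, if_pos ⟨by omega, by omega⟩])]
    rw [PySem.List.pySetD_of_nonneg w _ le_rfl, PySem.List.pySetD_of_nonneg nl _ le_rfl]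
    refine Prod.ext ?_ (Prod.ext ?_ ?_) <;> simp only
    · simp only [gW]
      norm_num
      rw [List.take_of_length_le (by omega)]
      rcases w with _ | ⟨y, ws⟩
      · simp at hw
      · simp
    · simp only [gZ]
      norm_num
      rcases z with _ | ⟨y, zs⟩
      · simp at hz
      · rw [List.take_of_length_le (le_of_eq hzn)]
        simp [PySem.List.pyGetD_zero_cons]
    · simp only [gN]
      norm_num
      rcases nl with _ | ⟨y, ns⟩
      · simp at hn
      · simp
  · -- 0 < i : overwrite entry i with the merge and delete entry i-1
    obtain ⟨j, rfl⟩ := Int.eq_ofNat_of_zero_le hi0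
    have hj1 : 1 ≤ j := by omega
    have hjn : j < nl.length := by omega
    rw [if_pos hpos]
    rw [PySem.List.pyRange_one_append 0 ((j : Int) - 1) (nl.length : Int) (by omega) (by omega),
        PySem.List.pyRange_one_cons (by omega : (j : Int) - 1 < (nl.length : Int)),
        PySem.List.pyRange_one_cons (by omega : (j : Int) - 1 + 1 < (nl.length : Int))]
    have e1 : (j : Int) - 1 + 1 = (j : Int) := by omega
    rw [e1]
    simp only [List.flatMap_append, List.flatMap_cons]
    rw [seg_copy w [] 0 ((j : Int) - 1) (by omega) (by omega)
          _ (fun k hk1 hk2 => by rw [gW, if_pos ⟨by omega, by omega⟩]),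
        seg_copy z [] 0 ((j : Int) - 1) (by omega) (by omega)
          _ (fun k hk1 hk2 => by rw [gZ, if_pos ⟨by omega, by omega⟩]),
        seg_copy nl 0 0 ((j : Int) - 1) (by omega) (by omega)
          _ (fun k hk1 hk2 => by rw [gN, if_pos ⟨by omega, by omega⟩]),
        seg_copy w [] ((j : Int) + 1) (nl.length : Int) (by omega) (by omega)
          _ (fun k hk1 hk2 => by rw [gW, if_pos ⟨by omega, by omega⟩]),
        seg_copy z [] ((j : Int) + 1) (nl.length : Int) (by omega) (by omega)
          _ (fun k hk1 hk2 => by rw [gZ, if_pos ⟨by omega, by omega⟩]),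
        seg_copy nl 0 ((j : Int) + 1) (nl.length : Int) (by omega) (by omega)
          _ (fun k hk1 hk2 => by rw [gN, if_pos ⟨by omega, by omega⟩])]
    have hne : ¬ ((j : Int) - 1 = (j : Int)) := by omega
    simp only [gW, gZ, gN, ne_eq, not_true_eq_false, false_and, and_false, if_false,
               if_neg hne, if_true, List.nil_append]
    rw [PySem.List.pySetD_of_nonneg w _ hi0, PySem.List.pySetD_of_nonneg nl _ hi0]
    have hjt : ((j : Int)).toNat = j := by omega
    have hjt1 : ((j : Int) - 1).toNat = j - 1 := by omega
    rw [hjt, hjt1]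
    rw [set_eraseIdx w j _ hj1 (by omega), set_eraseIdx nl j _ hj1 (by omega)]
    have htw : List.take ((nl.length : Int)).toNat w = w := List.take_of_length_le (by simp [hwn])
    have htz : List.take ((nl.length : Int)).toNat z = z := List.take_of_length_le (by simp [hzn])
    have htn : List.take ((nl.length : Int)).toNat nl = nl := List.take_of_length_le (by simp)
    rw [htw, htz, htn]
    refine Prod.ext ?_ (Prod.ext ?_ ?_) <;> simp only
    · have e3 : ((j : Int) + 1).toNat = j + 1 := by omega
      rw [e3]
      simp
    · -- A: take (j-1) ++ ([z[j]] ++ drop (j+1))  vs  B: z.eraseIdx (j-1) = take (j-1) ++ drop j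
      rw [List.eraseIdx_eq_take_drop_succ]
      have e3 : ((j : Int) + 1).toNat = j + 1 := by omega
      rw [e3]
      have hd : z.drop (j - 1 + 1) = PySem.List.pyGetD z (j : Int) [] :: z.drop (j + 1) := by
        rw [PySem.List.pyGetD_eq_getElem z [] (by omega) (by omega)]
        have e4 : j - 1 + 1 = j := by omega
        rw [e4, List.drop_eq_getElem_cons (by omega)]
        congr 1
      rw [hd]
      simp
    · have e3 : ((j : Int) + 1).toNat = j + 1 := by omega
      rw [e3]
      simp
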